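-- pv_equiv track=rewrite | github.com/matinabbasi788/contest | codeforces/489-C.py | solve
-- ===== SOURCE A (Python) =====
-- def solve(m, s):
--     if m == 1 and s == 0:
--         return "0 0"
--     if (s == 0 and m > 1) or s > 9*m or (s < 1 and m >= 1):
--         return "-1 -1"
--
--     min_num = ['0'] * m
--     remaining_sum = s
--
--     min_num[0] = '1'
--     remaining_sum -= 1
--
--     for i in range(m-1, -1, -1):
--         if remaining_sum > 9:
--             min_num[i] = '9'
--             remaining_sum -= 9
--         else:
--             min_num[i] = str(remaining_sum + int(min_num[i]))
--             remaining_sum = 0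
--             break
--
--     max_num = ['0'] * m
--     remaining_sum = s
--
--     for i in range(m):
--         if remaining_sum >= 9:
--             max_num[i] = '9'
--             remaining_sum -= 9
--         else:
--             max_num[i] = str(remaining_sum)
--             remaining_sum = 0
--             break
--
--     return ''.join(min_num) + ' ' + ''.join(max_num)
-- ===== SOURCE B (Python) =====
-- def solve(m, s):
--     if m == 1 and s == 0:
--         return "0 0"
--     if s < 1 or s > 9 * m:
--         return "-1 -1"
--     q, r = divmod(s, 9)
--     mx = '9' * q + (str(r) if r else '')
--     mx += '0' * (m - len(mx))
--     lead = max(1, s - 9 * (m - 1))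
--     rem = s - lead
--     nines, mid = divmod(rem, 9)
--     mn = str(lead) + '0' * (m - 1 - nines - (1 if mid else 0)) + (str(mid) if mid else '') + '9' * nines
--     return mn + ' ' + mx
-- ===== Notes on version B (the rewrite author's own statement) =====
-- stated objective: simpler
-- what changed: Replaces A's two greedy digit-filling loops over a mutable digit array by closed-form divmod arithmetic: max = '9'*q plus the remainder digit padded with zeros, min = leading digit max(1, s-9(m-1)) plus zeros, middle digit and trailing nines; bulk string repetition replaces the per-digit Python loop.
-- crash fix: On m <= 0 with s <= 9*m (so s <= 0) A raises IndexError assigning min_num[0] on an empty list; B returns '-1 -1' via its s < 1 guard. — e.g. on solve(0, 0): A raises IndexError, B returns "-1 -1"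
import Mathlib
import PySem

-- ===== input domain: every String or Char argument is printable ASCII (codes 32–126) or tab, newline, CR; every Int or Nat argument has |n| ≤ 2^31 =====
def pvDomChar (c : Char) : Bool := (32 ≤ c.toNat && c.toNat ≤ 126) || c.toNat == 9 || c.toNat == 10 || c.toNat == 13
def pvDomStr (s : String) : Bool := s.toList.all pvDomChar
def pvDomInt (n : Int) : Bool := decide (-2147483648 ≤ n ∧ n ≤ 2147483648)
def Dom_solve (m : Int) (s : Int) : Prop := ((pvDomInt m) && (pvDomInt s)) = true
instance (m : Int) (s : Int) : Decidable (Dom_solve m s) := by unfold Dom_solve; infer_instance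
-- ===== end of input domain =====

-- B replaces A's two greedy digit-filling loops over a mutable digit array by closed-form
-- divmod arithmetic building each half of the answer directly (objective: simpler).

-- ===== PORT A =====
-- Python's lists of one-character strings are ported as List (List Char); ''.join is List.flatten.
-- int(cell): the cells read are always digit strings, so ofChars? never fails; getD 0 is the parse.
def aCellInt (cell : List Char) : Int := (PySem.Int.ofChars? cell).getD 0

-- 'for i in range(m-1, -1, -1)' writing min_num[i], with break: structural recursion on the
-- descending index (exact: visits i = m-1, …, 0, stops early in the else branch like the break)
def aMinLoop : Nat → List (List Char) → Int → List (List Char)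
  | 0, arr, rem =>
      if rem > 9 then arr.set 0 ['9']
      else arr.set 0 (PySem.Int.toChars (rem + aCellInt (arr.getD 0 [])))
  | i+1, arr, rem =>
      if rem > 9 then aMinLoop i (arr.set (i+1) ['9']) (rem - 9)
      else arr.set (i+1) (PySem.Int.toChars (rem + aCellInt (arr.getD (i+1) [])))

-- 'for i in range(m)' writing max_num[i], with break: recursion over the remaining cells
-- (the untouched suffix stays as it is, like after Python's break)
def aMaxLoop : Int → List (List Char) → List (List Char)
  | _, [] => []
  | rem, _ :: rest =>
      if rem ≥ 9 then ['9'] :: aMaxLoop (rem - 9) rest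
      else PySem.Int.toChars rem :: rest

def solve (m : Int) (s : Int) : String :=
  if m = 1 ∧ s = 0 then "0 0"
  else if (s = 0 ∧ m > 1) ∨ s > 9 * m ∨ (s < 1 ∧ m ≥ 1) then "-1 -1"
  else
    -- min_num = ['0']*m ; min_num[0] = '1' ; remaining_sum = s - 1 ; downward loop
    let minArr := aMinLoop (m.toNat - 1) ((List.replicate m.toNat ['0']).set 0 ['1']) (s - 1)
    -- max_num = ['0']*m ; remaining_sum = s ; upward loop
    let maxArr := aMaxLoop s (List.replicate m.toNat ['0'])
    String.ofList (minArr.flatten ++ [' '] ++ maxArr.flatten)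

-- ===== PORT B =====
-- Source B built on the List Char side (PySem convention): '9'*q is PySem.List.pyRepeat ['9'] q,
-- str(n) is PySem.Int.toChars, len is List.length, + is ++.
def solve_alt (m : Int) (s : Int) : String :=
  if m = 1 ∧ s = 0 then "0 0"
  else if s < 1 ∨ s > 9 * m then "-1 -1"
  else
    let q := PySem.Int.floordiv s 9
    let r := PySem.Int.mod s 9
    let mx0 := PySem.List.pyRepeat ['9'] q ++ (if r ≠ 0 then PySem.Int.toChars r else [])
    let mx := mx0 ++ PySem.List.pyRepeat ['0'] (m - (mx0.length : Int))
    let lead := max 1 (s - 9 * (m - 1))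
    let rem := s - lead
    let nines := PySem.Int.floordiv rem 9
    let mid := PySem.Int.mod rem 9
    let mn := PySem.Int.toChars lead
      ++ PySem.List.pyRepeat ['0'] (m - 1 - nines - (if mid ≠ 0 then 1 else 0))
      ++ (if mid ≠ 0 then PySem.Int.toChars mid else [])
      ++ PySem.List.pyRepeat ['9'] nines
    String.ofList (mn ++ [' '] ++ mx)

-- ===== PRECONDITION & SPEC =====
-- Pre_ excludes exactly the inputs on which A raises: for m ≤ 0 with s ≤ 9*m every guard
-- falls through and "min_num[0] = '1'" is an IndexError on the empty list ['0']*m.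
def Pre_solve (m : Int) (s : Int) : Prop := 1 ≤ m ∨ 9 * m < s
instance (m : Int) (s : Int) : Decidable (Pre_solve m s) := by unfold Pre_solve; infer_instance
def pvWitness_solve : Int × Int := (3, 11)

-- On m ≤ 0 with s ≤ 9*m (so s ≤ 0) A raises IndexError assigning min_num[0] on an empty list;
-- B returns "-1 -1" via its s < 1 guard (made checkable by Claim_raises_solve).
def Raises_solve (m : Int) (s : Int) : Prop := m ≤ 0 ∧ s ≤ 9 * m
instance (m : Int) (s : Int) : Decidable (Raises_solve m s) := by unfold Raises_solve; infer_instance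
def pvRaiseWitness_solve : Int × Int := (0, 0)
def pvRaiseWitnessOut_solve : String := "-1 -1"

def Spec_solve (m : Int) (s : Int) (out : String) : Prop := out = solve_alt m s
instance (m : Int) (s : Int) (out : String) : Decidable (Spec_solve m s out) := by unfold Spec_solve; infer_instance

-- ===== CLAIM (what is proved, stated in full; the proofs are below) =====
def Claim_equal_solve : Prop := ∀ (m : Int) (s : Int), Dom_solve m s → Pre_solve m s → Spec_solve m s (solve m s)
def Claim_raises_solve : Prop := (∀ (m : Int) (s : Int), Dom_solve m s → Raises_solve m s → ¬ Pre_solve m s) ∧ (Dom_solve (pvRaiseWitness_solve.1) (pvRaiseWitness_solve.2) ∧ Raises_solve (pvRaiseWitness_solve.1) (pvRaiseWitness_solve.2) ∧ solve_alt (pvRaiseWitness_solve.1) (pvRaiseWitness_solve.2) = pvRaiseWitnessOut_solve)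

-- ===== LEMMAS AND PROOFS =====

lemma repl_set {α : Type} (i : Nat) (a b : α) (t : List α) :
    (List.replicate (i+1) a ++ t).set i b = List.replicate i a ++ b :: t := by
  induction i with
  | zero => simp [List.replicate_succ]
  | succ i ih =>
    rw [List.replicate_succ (n := i+1), List.cons_append, List.set_cons_succ, ih]
    simp [List.replicate_succ]

lemma repl_getD {α : Type} (i : Nat) (a d : α) (t : List α) :
    (List.replicate (i+1) a ++ t).getD i d = a := by
  induction i with
  | zero => simp [List.replicate_succ]
  | succ i ih => rw [List.replicate_succ (n := i+1)]; simp only [List.cons_append, List.getD_cons_succ]; exact ih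

lemma flatten_repl (n : Nat) (c : Char) : (List.replicate n [c]).flatten = List.replicate n c := by
  induction n with
  | zero => simp
  | succ n ih => simp [List.replicate_succ, ih]

lemma toChars_digit_len (k : Nat) (h : k < 10) : (PySem.Int.toChars ((k : Nat) : Int)).length = 1 := by
  interval_cases k <;> decide

-- A's max loop in closed form: q = rem/9 leading nines, then the remainder digit, then zeros
lemma maxLoop_spec (n : Nat) : ∀ (rem : Int), 0 ≤ rem →
    aMaxLoop rem (List.replicate n ['0']) =
      if 9 * (n : Int) ≤ rem then List.replicate n ['9']
      else List.replicate (rem.toNat / 9) ['9']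
            ++ PySem.Int.toChars ((rem.toNat % 9 : Nat) : Int)
            :: List.replicate (n - rem.toNat / 9 - 1) ['0'] := by
  induction n with
  | zero => intro rem h; simp [aMaxLoop]; omega
  | succ n ih =>
    intro rem h
    rw [List.replicate_succ, aMaxLoop]
    by_cases h9 : rem ≥ 9
    · rw [if_pos h9, ih (rem - 9) (by omega)]
      by_cases hc : 9 * ((n : Nat) : Int) ≤ rem - 9
      · rw [if_pos hc, if_pos (by push_cast; omega), List.replicate_succ]
      · rw [if_neg hc, if_neg (by push_cast at hc ⊢; omega)]
        have h1 : (rem - 9).toNat / 9 + 1 = rem.toNat / 9 := by omega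
        have h2 : (rem - 9).toNat % 9 = rem.toNat % 9 := by omega
        rw [h2, ← h1, List.replicate_succ]
        simp
    · rw [if_neg h9, if_neg (by push_cast; omega)]
      have h1 : rem.toNat / 9 = 0 := by omega
      have h2 : rem.toNat % 9 = rem.toNat := by omega
      rw [h1, h2]
      simp
      congr 1
      omega

-- A's min loop in closed form, for an array '1' followed by i zeros (then already-written cells)
lemma minLoop_spec (i : Nat) : ∀ (rem : Int) (tail : List (List Char)),
    0 ≤ rem → rem ≤ 9 * (i : Int) + 8 →
    aMinLoop i (['1'] :: (List.replicate i ['0'] ++ tail)) rem =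
      if 9 * (i : Int) < rem then
        PySem.Int.toChars (rem - 9 * (i : Int) + 1) :: (List.replicate i ['9'] ++ tail)
      else
        ['1'] :: (List.replicate (i - rem.toNat / 9 - (if rem.toNat % 9 = 0 then 0 else 1)) ['0']
          ++ (if rem.toNat % 9 = 0 then [] else [PySem.Int.toChars ((rem.toNat % 9 : Nat) : Int)])
          ++ List.replicate (rem.toNat / 9) ['9'] ++ tail) := by
  induction i with
  | zero =>
    intro rem tail h0 h8
    rw [aMinLoop, if_neg (by omega)]
    simp only [List.replicate_zero, List.nil_append, List.getD_cons_zero, List.set_cons_zero]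
    by_cases hr : (0 : Int) < rem
    · rw [if_pos (by simpa using hr)]
      rw [show aCellInt ['1'] = 1 from by decide]
      congr 2
      omega
    · have hrem : rem = 0 := by omega
      subst hrem
      norm_num
      decide
  | succ i ih =>
    intro rem tail h0 h8
    rw [aMinLoop]
    by_cases h9 : rem > 9
    · rw [if_pos h9]
      rw [show (['1'] :: (List.replicate (i+1) ['0'] ++ tail)).set (i+1) ['9']
            = ['1'] :: (List.replicate i ['0'] ++ ['9'] :: tail) from by
        simp only [List.set_cons_succ]; rw [repl_set]]
      rw [ih (rem - 9) (['9'] :: tail) (by omega) (by omega)]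
      by_cases hc : 9 * (i : Int) < rem - 9
      · rw [if_pos hc, if_pos (by push_cast; omega)]
        rw [List.replicate_succ' (n := i)]
        simp only [List.append_assoc, List.cons_append, List.nil_append]
        congr 2
        push_cast
        ring
      · have hR : ¬ (9 * (((i:Nat)+1 : Nat) : Int) < rem) := by push_cast at hc ⊢; omega
        rw [if_neg hc, if_neg hR]
        have e1 : rem.toNat / 9 = (rem - 9).toNat / 9 + 1 := by omega
        have e2 : (rem - 9).toNat % 9 = rem.toNat % 9 := by omega
        have hb : (rem - 9).toNat / 9 ≤ i := by omega
        have e3 : (i - (rem - 9).toNat / 9 - (if rem.toNat % 9 = 0 then 0 else 1) : Nat)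
            = (i + 1 - rem.toNat / 9 - (if rem.toNat % 9 = 0 then 0 else 1) : Nat) := by
          rw [e1]; split <;> omega
        rw [e2, e3, e1, List.replicate_succ' (n := (rem - 9).toNat / 9)]
        simp [List.append_assoc]
    · rw [if_neg h9]
      rw [show (['1'] :: (List.replicate (i+1) ['0'] ++ tail)).getD (i+1) []
            = ['0'] from by simp only [List.getD_cons_succ]; rw [repl_getD]]
      rw [show aCellInt ['0'] = 0 from by decide]
      rw [show (['1'] :: (List.replicate (i+1) ['0'] ++ tail)).set (i+1)
              (PySem.Int.toChars (rem + 0))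
            = ['1'] :: (List.replicate i ['0'] ++ PySem.Int.toChars (rem + 0) :: tail) from by
        simp only [List.set_cons_succ]; rw [repl_set]]
      rw [if_neg (show ¬ (9 * (((i:Nat)+1 : Nat) : Int) < rem) from by push_cast; omega)]
      rcases show rem = 0 ∨ rem = 9 ∨ (1 ≤ rem ∧ rem ≤ 8) from by omega with h | h | h
      · subst h
        rw [show PySem.Int.toChars (0 + 0) = ['0'] from by decide]
        norm_num
        rw [List.replicate_succ' (n := i)]
        simp
      · subst h
        rw [show PySem.Int.toChars (9 + 0) = ['9'] from by decide]
        norm_num [show Int.toNat 9 = 9 from rfl]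
      · have e1 : rem.toNat / 9 = 0 := by omega
        have e2 : rem.toNat % 9 = rem.toNat := by omega
        rw [e1, e2, if_neg (by omega), if_neg (by omega)]
        rw [show ((rem.toNat : Int)) = rem + 0 from by omega]
        simp only [Nat.add_sub_cancel, Nat.sub_zero, List.replicate_zero, List.append_nil]
        simp

-- A's joined max string equals B's divmod construction
lemma max_eq (M : Nat) (s : Int) (h1 : 1 ≤ s) (h2 : s ≤ 9 * (M : Int)) :
    (aMaxLoop s (List.replicate M ['0'])).flatten =
      (PySem.List.pyRepeat ['9'] (PySem.Int.floordiv s 9)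
          ++ (if PySem.Int.mod s 9 ≠ 0 then PySem.Int.toChars (PySem.Int.mod s 9) else []))
        ++ PySem.List.pyRepeat ['0'] ((M : Int) -
            ((PySem.List.pyRepeat ['9'] (PySem.Int.floordiv s 9)
              ++ (if PySem.Int.mod s 9 ≠ 0 then PySem.Int.toChars (PySem.Int.mod s 9) else [])).length : Int)) := by
  have hq : PySem.Int.floordiv s 9 = ((s.toNat / 9 : Nat) : Int) := by
    rw [PySem.Int.floordiv_eq_ediv_of_pos (by norm_num)]; omega
  have hr : PySem.Int.mod s 9 = ((s.toNat % 9 : Nat) : Int) := by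
    rw [PySem.Int.mod_eq_emod_of_pos (by norm_num)]; omega
  rw [maxLoop_spec M s (by omega), hq, hr]
  by_cases hc : 9 * (M : Int) ≤ s
  · -- s = 9*M exactly
    have hs : s.toNat = 9 * M := by omega
    have hq9 : s.toNat / 9 = M := by omega
    have hr9 : s.toNat % 9 = 0 := by omega
    rw [if_pos hc, hq9, hr9]
    simp [PySem.List.pyRepeat_singleton]
  · rw [if_neg hc]
    have hqM : s.toNat / 9 ≤ M - 1 := by omega
    by_cases hmd : s.toNat % 9 = 0
    · rw [hmd]
      simp only [Nat.cast_zero, ne_eq, not_true_eq_false, if_false,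
        PySem.List.pyRepeat_singleton, List.append_nil]
      rw [show PySem.Int.toChars (0 : Int) = ['0'] from by decide]
      rw [List.flatten_append, flatten_repl, List.flatten_cons, flatten_repl]
      have hpad : ((M : Int) - ((List.replicate ((((s.toNat / 9 : Nat) : Int)).toNat) '9').length : Int)).toNat
          = M - s.toNat / 9 := by
        rw [List.length_replicate, Int.toNat_natCast]; omega
      rw [hpad, Int.toNat_natCast]
      rw [show M - s.toNat / 9 = (M - s.toNat / 9 - 1) + 1 from by omega, List.replicate_succ]
      simp
    · rw [if_pos (by exact_mod_cast hmd)]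
      rw [List.flatten_append, flatten_repl, List.flatten_cons, flatten_repl]
      simp only [PySem.List.pyRepeat_singleton]
      have hlen : (PySem.Int.toChars ((s.toNat % 9 : Nat) : Int)).length = 1 :=
        toChars_digit_len _ (by omega)
      have hpad : ((M : Int) - (((List.replicate ((((s.toNat / 9 : Nat) : Int)).toNat) '9')
            ++ PySem.Int.toChars ((s.toNat % 9 : Nat) : Int)).length : Int)).toNat
          = M - s.toNat / 9 - 1 := by
        rw [List.length_append, List.length_replicate, hlen, Int.toNat_natCast]; omega
      rw [hpad]
      simp only [Int.toNat_natCast, List.append_assoc]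

-- A's joined min string equals B's lead/zeros/mid/nines construction (m = K+1 digits)
lemma min_eq (K : Nat) (s : Int) (h1 : 1 ≤ s) (h2 : s ≤ 9 * (K : Int) + 9) :
    (aMinLoop K ((List.replicate (K+1) ['0']).set 0 ['1']) (s - 1)).flatten =
      PySem.Int.toChars (max 1 (s - 9 * (K : Int)))
        ++ PySem.List.pyRepeat ['0'] ((K : Int) - PySem.Int.floordiv (s - max 1 (s - 9 * (K : Int))) 9
            - (if PySem.Int.mod (s - max 1 (s - 9 * (K : Int))) 9 ≠ 0 then 1 else 0))
        ++ (if PySem.Int.mod (s - max 1 (s - 9 * (K : Int))) 9 ≠ 0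
            then PySem.Int.toChars (PySem.Int.mod (s - max 1 (s - 9 * (K : Int))) 9) else [])
        ++ PySem.List.pyRepeat ['9'] (PySem.Int.floordiv (s - max 1 (s - 9 * (K : Int))) 9) := by
  rw [List.replicate_succ, List.set_cons_zero, ← List.append_nil (List.replicate K ['0'])]
  rw [minLoop_spec K (s-1) [] (by omega) (by omega)]
  by_cases hc : 9 * (K : Int) < s - 1
  · rw [if_pos hc]
    have hlead : max 1 (s - 9 * (K : Int)) = s - 9 * (K : Int) := by omega
    rw [hlead]
    rw [show s - (s - 9 * (K : Int)) = 9 * (K : Int) from by ring]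
    have hnines : PySem.Int.floordiv (9 * (K : Int)) 9 = (K : Int) := by
      rw [PySem.Int.floordiv_eq_ediv_of_pos (by norm_num)]; omega
    have hmid : PySem.Int.mod (9 * (K : Int)) 9 = 0 := by
      rw [PySem.Int.mod_eq_emod_of_pos (by norm_num)]; omega
    rw [hnines, hmid]
    simp only [ne_eq, not_true_eq_false, if_false, sub_self,
      PySem.List.pyRepeat_singleton, Int.toNat_natCast]
    rw [List.flatten_cons]
    simp only [List.append_nil, Int.toNat_zero, List.replicate_zero]
    rw [flatten_repl]
    congr 2
    omega
  · rw [if_neg hc]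
    have hlead : max 1 (s - 9 * (K : Int)) = 1 := by omega
    rw [hlead, show PySem.Int.toChars (1 : Int) = ['1'] from by decide]
    have hq : PySem.Int.floordiv (s - 1) 9 = (((s-1).toNat / 9 : Nat) : Int) := by
      rw [PySem.Int.floordiv_eq_ediv_of_pos (by norm_num)]; omega
    have hr : PySem.Int.mod (s - 1) 9 = (((s-1).toNat % 9 : Nat) : Int) := by
      rw [PySem.Int.mod_eq_emod_of_pos (by norm_num)]; omega
    rw [hq, hr]
    by_cases hmd : (s-1).toNat % 9 = 0
    · rw [hmd]
      simp only [Nat.cast_zero, ne_eq, not_true_eq_false, if_false, sub_zero,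
        PySem.List.pyRepeat_singleton, Int.toNat_natCast, List.append_nil]
      have hz : ((K : Int) - (((s-1).toNat / 9 : Nat) : Int)).toNat = K - (s-1).toNat / 9 := by
        omega
      simp
      omega
    · rw [if_neg (by simpa using hmd)]
      simp only [PySem.List.pyRepeat_singleton, Int.toNat_natCast]
      have hz : ((K : Int) - (((s-1).toNat / 9 : Nat) : Int) - 1).toNat = K - (s-1).toNat / 9 - 1 := by
        omega
      simp
      have hdvd : ¬ ((9 : Int) ∣ ((s.toNat - 1 : Nat) : Int)) := by omega
      have hz2 : ((K : Int) - (((s.toNat - 1 : Nat) : Int)) / 9 - 1).toNat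
          = K - (s.toNat - 1) / 9 - 1 := by omega
      simp [hdvd, hz2]
      rw [if_neg (by omega)]
      simp

theorem main_eq (m s : Int) (hpre : 1 ≤ m ∨ 9 * m < s) : solve m s = solve_alt m s := by

  unfold solve solve_alt
  by_cases h00 : m = 1 ∧ s = 0
  · rw [if_pos h00, if_pos h00]
  · rw [if_neg h00, if_neg h00]
    by_cases hbad : s < 1 ∨ s > 9 * m
    · rw [if_pos (by omega), if_pos hbad]
    · rw [if_neg (by omega), if_neg hbad]
      have hs1 : 1 ≤ s := by omega
      have hs2 : s ≤ 9 * m := by omega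
      have hm : 1 ≤ m := by omega
      obtain ⟨K, hK⟩ : ∃ K : Nat, m = (K : Int) + 1 := ⟨(m-1).toNat, by omega⟩
      subst hK
      dsimp only
      congr 1
      rw [show ((K : Int) + 1).toNat = K + 1 from by omega]
      rw [show (K : Int) + 1 - 1 = (K : Int) from by ring]
      rw [show K + 1 - 1 = K from rfl]
      rw [min_eq K s hs1 (by omega), max_eq (K+1) s hs1 (by push_cast; omega)]
      push_cast
      simp [List.append_assoc]

-- ===== VERDICT (by name: the statement is the Claim_ definition above) =====
theorem solve_spec : Claim_equal_solve := by
  intro m s _ hpre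
  unfold Spec_solve
  exact main_eq m s hpre

theorem solve_raises : Claim_raises_solve := by
  unfold Claim_raises_solve
  exact ⟨by intro m s _ hr; unfold Raises_solve at hr; unfold Pre_solve; omega, by decide⟩

-- self-check: the raise witness (0, 0) indeed lies outside Pre_solve
theorem solve_raises_witness_ok : ¬ Pre_solve 0 0 :=
  solve_raises.1 0 0 (by decide) (by decide)
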